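-- pv_equiv track=rewrite | github.com/allthingslinux/tux | tux/cogs/utility/tldr.py | get_language_priority
-- ===== SOURCE A (Python) =====
-- def get_language_priority(lang_env: str | None = None, language_env: str | None = None) -> list[str]:
--     """Get a prioritized list of languages to try."""
--     languages: list[str] = []
--     if language_env:
--         languages.extend([lang for lang in language_env.split(":") if lang and lang not in ("C", "POSIX")])
--     if lang_env and lang_env not in ("C", "POSIX") and lang_env not in languages:
--         languages.append(lang_env)
--     if "en" not in languages:
--         languages.append("en")
--     return languages
-- ===== SOURCE B (Python) =====
-- def get_language_priority(lang_env: str | None = None, language_env: str | None = None) -> list[str]: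
--     """Get a prioritized list of languages to try."""
--     candidates = (language_env.split(":") if language_env else []) + [lang_env or "", "en"]
--     result: list[str] = []
--     for c in candidates:
--         if c and c not in ("C", "POSIX") and c not in result:
--             result.append(c)
--     return result
-- ===== Notes on version B (the rewrite author's own statement) =====
-- stated objective: simpler
-- what changed: Replaces A's three separate conditional append branches by building one ordered candidate list (split entries, lang_env, 'en') and making a single uniform filter-and-dedup pass over it.
-- intended difference: When language_env's colon-separated list repeats a kept entry (e.g. 'fr:fr'), A returns the duplicate twice in the priority list while B keeps only the first occurrence, which is the intended meaning of a prioritized list of languages to try. — e.g. on get_language_priority(none, some "fr:fr"): A returns ["fr", "fr", "en"], B returns ["fr", "en"]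
import Mathlib
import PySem

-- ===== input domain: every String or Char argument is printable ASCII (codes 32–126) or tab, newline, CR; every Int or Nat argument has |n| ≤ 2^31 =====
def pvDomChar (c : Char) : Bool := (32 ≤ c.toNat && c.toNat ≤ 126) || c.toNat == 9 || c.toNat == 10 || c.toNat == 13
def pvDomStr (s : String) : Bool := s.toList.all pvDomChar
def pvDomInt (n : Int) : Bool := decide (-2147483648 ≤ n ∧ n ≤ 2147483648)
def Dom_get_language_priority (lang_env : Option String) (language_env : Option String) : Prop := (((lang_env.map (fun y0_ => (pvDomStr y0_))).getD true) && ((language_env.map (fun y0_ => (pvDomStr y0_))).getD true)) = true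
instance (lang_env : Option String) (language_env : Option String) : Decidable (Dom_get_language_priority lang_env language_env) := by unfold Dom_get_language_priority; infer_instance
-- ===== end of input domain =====

-- B replaces A's three conditional branches by one candidate list and a single uniform
-- filter-and-dedup pass (simpler); B also drops duplicates repeated inside language_env,
-- which A keeps (see D_get_language_priority).


-- ===== PORT A =====
-- `lang and lang not in ("C", "POSIX")` as a Bool predicate
def gpKeep (l : String) : Bool := l ≠ "" && l ≠ "C" && l ≠ "POSIX"

def get_language_priority (lang_env : Option String) (language_env : Option String) : List String :=
  let languages : List String := []
  let languages :=
    match language_env with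
    | some s => if s ≠ "" then languages ++ ((PySem.Str.split? s ":").getD []).filter gpKeep else languages
    | none => languages
  let languages :=
    match lang_env with
    | some l => if gpKeep l && ¬ l ∈ languages then languages ++ [l] else languages
    | none => languages
  if "en" ∈ languages then languages else languages ++ ["en"]

-- ===== PORT B =====
-- loop body: append c iff it is truthy, not "C"/"POSIX", and not already in the result
def gpAltStep (acc : List String) (c : String) : List String :=
  if gpKeep c && ¬ c ∈ acc then acc ++ [c] else acc

def get_language_priority_alt (lang_env : Option String) (language_env : Option String) : List String :=
  let candidates :=
    (match language_env with
     | some s => if s ≠ "" then (PySem.Str.split? s ":").getD [] else []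
     | none => []) ++ [(match lang_env with | some l => l | none => ""), "en"]
  candidates.foldl gpAltStep []

-- ===== PRECONDITION & SPEC =====
-- When language_env's colon-separated list repeats a kept entry, A returns the duplicate twice
-- in the priority list while B keeps only the first occurrence, which is the intended meaning
-- of a prioritized list of languages to try.
def D_get_language_priority (lang_env : Option String) (language_env : Option String) : Prop :=
  language_env.getD "" ≠ "" ∧
    ¬ (((PySem.Str.split? (language_env.getD "") ":").getD []).filter gpKeep).Nodup
instance (lang_env : Option String) (language_env : Option String) : Decidable (D_get_language_priority lang_env language_env) := by unfold D_get_language_priority; infer_instance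

def Spec_get_language_priority (lang_env : Option String) (language_env : Option String) (out : List String) : Prop := ¬ D_get_language_priority lang_env language_env → out = get_language_priority_alt lang_env language_env
instance (lang_env : Option String) (language_env : Option String) (out : List String) : Decidable (Spec_get_language_priority lang_env language_env out) := by unfold Spec_get_language_priority; infer_instance

def pvDiffWitness_get_language_priority : Option String × Option String := (none, some "fr:fr")
def pvDiffWitnessOut_get_language_priority : (List String) × (List String) := (["fr", "fr", "en"], ["fr", "en"])

-- ===== CLAIM (what is proved, stated in full; the proofs are below) =====
def Claim_unchanged_get_language_priority : Prop := ∀ (lang_env : Option String) (language_env : Option String), Dom_get_language_priority lang_env language_env → Spec_get_language_priority lang_env language_env (get_language_priority lang_env language_env)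
def Claim_changed_get_language_priority : Prop := Dom_get_language_priority (pvDiffWitness_get_language_priority.1) (pvDiffWitness_get_language_priority.2) ∧ D_get_language_priority (pvDiffWitness_get_language_priority.1) (pvDiffWitness_get_language_priority.2) ∧ get_language_priority (pvDiffWitness_get_language_priority.1) (pvDiffWitness_get_language_priority.2) = pvDiffWitnessOut_get_language_priority.1 ∧ get_language_priority_alt (pvDiffWitness_get_language_priority.1) (pvDiffWitness_get_language_priority.2) = pvDiffWitnessOut_get_language_priority.2 ∧ pvDiffWitnessOut_get_language_priority.1 ≠ pvDiffWitnessOut_get_language_priority.2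
def Claim_exact_get_language_priority : Prop := ∀ (lang_env : Option String) (language_env : Option String), Dom_get_language_priority lang_env language_env → D_get_language_priority lang_env language_env → get_language_priority lang_env language_env ≠ get_language_priority_alt lang_env language_env

-- ===== LEMMAS AND PROOFS =====

theorem gpAltStep_of_not_keep (acc : List String) (c : String) (h : gpKeep c = false) :
    gpAltStep acc c = acc := by simp [gpAltStep, h]

theorem gpAltStep_en (F : List String) :
    gpAltStep F "en" = if "en" ∈ F then F else F ++ ["en"] := by
  by_cases h : "en" ∈ F <;> simp [gpAltStep, gpKeep, h]

-- Folding B's step over a list whose kept entries are fresh and pairwise distinct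
-- just appends the kept entries.
theorem foldl_gpAltStep_filter (S : List String) :
    ∀ (acc : List String), (S.filter gpKeep).Nodup →
      (∀ c ∈ S, gpKeep c → ¬ c ∈ acc) →
      S.foldl gpAltStep acc = acc ++ S.filter gpKeep := by
  induction S with
  | nil => intro acc _ _; simp
  | cons c cs ih =>
    intro acc hnd hfresh
    by_cases hk : gpKeep c = true
    · have hmem : ¬ c ∈ acc := hfresh c (by simp) hk
      have hfilter : (c :: cs).filter gpKeep = c :: cs.filter gpKeep := by
        simp [hk]
      rw [hfilter] at hnd
      have hnotin := (List.nodup_cons.mp hnd).1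
      have hndtl := (List.nodup_cons.mp hnd).2
      have hstep : gpAltStep acc c = acc ++ [c] := by simp [gpAltStep, hk, hmem]
      have hrec := ih (acc ++ [c]) hndtl (by
        intro d hd hkd
        simp only [List.mem_append, List.mem_singleton, not_or]
        refine ⟨hfresh d (by simp [hd]) hkd, ?_⟩
        intro hdc
        exact hnotin (hdc ▸ List.mem_filter.mpr ⟨hd, hkd⟩))
      simp only [List.foldl_cons, hstep, hrec, hfilter]
      simp
    · have hk' : gpKeep c = false := by simpa using hk
      have hfilter : (c :: cs).filter gpKeep = cs.filter gpKeep := by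
        simp [hk']
      rw [hfilter] at hnd
      simp only [List.foldl_cons, gpAltStep_of_not_keep acc c hk', hfilter]
      exact ih acc hnd (fun d hd hkd => hfresh d (by simp [hd]) hkd)

-- B's step preserves Nodup of the accumulator.
theorem gpAltStep_nodup (acc : List String) (c : String) (h : acc.Nodup) : (gpAltStep acc c).Nodup := by
  unfold gpAltStep
  split_ifs with hc
  · simp only [Bool.and_eq_true, decide_eq_true_eq] at hc
    exact List.Nodup.append h (List.nodup_singleton c) (by simpa using hc.2)
  · exact h

theorem foldl_gpAltStep_nodup (S : List String) : ∀ acc : List String, acc.Nodup → (S.foldl gpAltStep acc).Nodup := by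
  induction S with
  | nil => intro acc h; simpa
  | cons c cs ih => intro acc h; exact ih _ (gpAltStep_nodup acc c h)

-- B's output always has no duplicates.
theorem alt_nodup (lang_env language_env : Option String) : (get_language_priority_alt lang_env language_env).Nodup := by
  unfold get_language_priority_alt
  exact foldl_gpAltStep_nodup _ [] List.nodup_nil

-- the kept entries of language_env, as A computes them
def gpBase (language_env : Option String) : List String :=
  match language_env with
  | some s => if s ≠ "" then ((PySem.Str.split? s ":").getD []).filter gpKeep else []
  | none => []

theorem a_eq_base (lang_env language_env : Option String) :
    get_language_priority lang_env language_env =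
      (let languages := gpBase language_env
       let languages :=
         match lang_env with
         | some l => if gpKeep l && ¬ l ∈ languages then languages ++ [l] else languages
         | none => languages
       if "en" ∈ languages then languages else languages ++ ["en"]) := by
  unfold get_language_priority gpBase
  cases language_env <;> simp

-- A's output starts with the kept entries of language_env.
theorem a_prefix (lang_env language_env : Option String) :
    ∃ t, get_language_priority lang_env language_env = gpBase language_env ++ t := by
  rw [a_eq_base]
  cases lang_env with
  | none =>
    simp only
    split_ifs
    · exact ⟨[], by simp⟩
    · exact ⟨["en"], rfl⟩
  | some l =>
    simp only
    split_ifs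
    · exact ⟨[l], rfl⟩
    · exact ⟨[l, "en"], by simp⟩
    · exact ⟨[], by simp⟩
    · exact ⟨["en"], rfl⟩

-- Outside D_, B's fold over the candidates reproduces A's three-branch construction.
theorem unchanged (lang_env language_env : Option String)
    (hD : ¬ D_get_language_priority lang_env language_env) :
    get_language_priority lang_env language_env = get_language_priority_alt lang_env language_env := by
  have hbase_nodup : (gpBase language_env).Nodup := by
    unfold gpBase
    cases language_env with
    | none => simp
    | some s =>
      by_cases hs : s = ""
      · simp [hs]
      · have hnd : (((PySem.Str.split? s ":").getD []).filter gpKeep).Nodup := by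
          by_contra h
          exact hD ⟨hs, h⟩
        simpa [hs] using hnd
  have hfold : (match language_env with
      | some s => if s ≠ "" then (PySem.Str.split? s ":").getD [] else []
      | none => []).foldl gpAltStep [] = gpBase language_env := by
    cases language_env with
    | none => simp [gpBase]
    | some s =>
      by_cases hs : s = ""
      · simp [gpBase, hs]
      · have := foldl_gpAltStep_filter ((PySem.Str.split? s ":").getD []) []
          (by simpa [gpBase, hs] using hbase_nodup) (by simp)
        simpa [gpBase, hs] using this
  unfold get_language_priority_alt
  rw [List.foldl_append, hfold, a_eq_base]
  cases lang_env with
  | none =>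
    simp only [List.foldl_cons, List.foldl_nil]
    rw [gpAltStep_of_not_keep _ "" (by simp [gpKeep]), gpAltStep_en]
  | some l =>
    simp only [List.foldl_cons, List.foldl_nil]
    rw [gpAltStep_en]
    rfl

-- ===== VERDICT (by name: the statement is the Claim_ definition above) =====
theorem get_language_priority_spec : Claim_unchanged_get_language_priority := by
  intro lang_env language_env _ hD
  exact unchanged lang_env language_env hD

theorem get_language_priority_changed : Claim_changed_get_language_priority := by
  unfold Claim_changed_get_language_priority; decide

theorem get_language_priority_tight : Claim_exact_get_language_priority := by
  intro lang_env language_env _ hD heq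
  have hB := alt_nodup lang_env language_env
  rw [← heq] at hB
  obtain ⟨t, ht⟩ := a_prefix lang_env language_env
  rw [ht] at hB
  have hbase := hB.of_append_left
  unfold D_get_language_priority at hD
  obtain ⟨hs, hdup⟩ := hD
  apply hdup
  cases hle : language_env with
  | none => simp [hle] at hs
  | some s =>
    rw [hle] at hbase hs
    have hs' : ¬ s = "" := by simpa using hs
    simpa [gpBase, hs'] using hbase
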